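-- pv_equiv track=rewrite | github.com/Conut-1/Python_Learning | 백준/단계별로 풀기/DynamicProgrammingAndShortestPathBacktracking/7. DSLR_9019.py | bfs
-- ===== SOURCE A (Python) =====
-- from collections import deque
--
-- def d(n):
--     return (2 * n) % 10000
--
-- def s(n):
--     return (n + 9999) % 10000
--
-- def l(n):
--     return (10 * n + n // 1000) % 10000
--
-- def r(n):
--     return n // 10 + (n % 10) * 1000
--
-- def bfs(a, b):
--     visited = [0] * 10000
--     queue = deque()
--     queue.append((a, ""))
--     visited[a] = 1
--     while queue:
--         cur, insts = queue.popleft()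
--         for inst in ("D", "S", "L", "R"):
--             if inst == "D":
--                 next = d(cur)
--                 if visited[next] == 1:
--                     continue
--                 queue.append((next, insts + inst))
--                 visited[next] = 1
--             if inst == "S":
--                 next = s(cur)
--                 if visited[next] == 1:
--                     continue
--                 queue.append((next, insts + inst))
--                 visited[next] = 1
--             if inst == "L":
--                 if not insts or insts[-1] != "R" or (len(insts) >= 3 and inst[-3:] != "LLL"):
--                     next = l(cur)
--                     if visited[next] == 1:
--                         continue
--                     queue.append((next, insts + inst))
--                     visited[next] = 1
--             if inst == "R":
--                 if not insts or insts[-1] != "L" or (len(insts) >= 3 and inst[-3:] != "RRR"):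
--                     next = r(cur)
--                     if visited[next] == 1:
--                         continue
--                     queue.append((next, insts + inst))
--                     visited[next] = 1
--             if next == b:
--                 return insts + inst
-- ===== SOURCE B (Python) =====
-- from collections import deque
--
-- def d(n):
--     return (2 * n) % 10000
--
-- def s(n):
--     return (n + 9999) % 10000
--
-- def l(n):
--     return (10 * n + n // 1000) % 10000
--
-- def r(n):
--     return n // 10 + (n % 10) * 1000
--
-- def bfs(a, b):
--     # BFS over the 10000 states, remembering for each newly visited state the
--     # (operation, parent) that first reached it; the command string is
--     # reconstructed once, when b is dequeued, instead of being carried around.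
--     prev = {}
--     visited = [False] * 10000
--     visited[a] = True
--     queue = deque([a])
--     while queue:
--         cur = queue.popleft()
--         if cur == b:
--             ops = []
--             while cur != a:
--                 op, p = prev[cur]
--                 ops.append(op)
--                 cur = p
--             return "".join(reversed(ops))
--         for op, nxt in (("D", d(cur)), ("S", s(cur)), ("L", l(cur)), ("R", r(cur))):
--             if not visited[nxt]:
--                 visited[nxt] = True
--                 prev[nxt] = (op, cur)
--                 queue.append(nxt)
--     raise ValueError("target unreachable")
-- ===== Notes on version B (the rewrite author's own statement) =====
-- stated objective: alternative
-- what changed: B runs the BFS storing one (op, parent) pointer per state and reconstructs the command string once when b is dequeued, instead of carrying a growing command string in every queue entry; A's string-suffix pruning tests disappear (they only re-derive already-visited states).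
-- outside the precondition, e.g. on bfs(-5, 1): A returns 'DLDLSDSDDDL', B returns 'DLDLSDSDDDL'; on bfs(5, 5): A returns None, B returns ''
import Mathlib
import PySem

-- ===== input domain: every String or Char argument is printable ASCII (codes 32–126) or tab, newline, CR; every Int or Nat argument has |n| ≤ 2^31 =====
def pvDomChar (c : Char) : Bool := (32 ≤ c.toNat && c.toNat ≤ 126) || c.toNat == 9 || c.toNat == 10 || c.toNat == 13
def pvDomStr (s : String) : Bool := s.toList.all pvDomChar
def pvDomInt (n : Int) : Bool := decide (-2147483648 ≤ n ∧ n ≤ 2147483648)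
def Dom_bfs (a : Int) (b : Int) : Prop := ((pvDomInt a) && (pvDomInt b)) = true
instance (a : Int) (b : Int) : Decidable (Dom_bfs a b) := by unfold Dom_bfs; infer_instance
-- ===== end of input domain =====

-- B stores (op, parent) pointers and rebuilds the answer once instead of carrying
-- a command string in every queue entry; same return value, not measurably faster.

-- ===== PORT A =====
-- module helpers d, s, l, r (shared by both Pythons)
def pyD (n : Int) : Int := PySem.Int.mod (2 * n) 10000
def pyS (n : Int) : Int := PySem.Int.mod (n + 9999) 10000
def pyL (n : Int) : Int := PySem.Int.mod (10 * n + PySem.Int.floordiv n 1000) 10000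
def pyR (n : Int) : Int := PySem.Int.floordiv n 10 + PySem.Int.mod n 10 * 1000

-- Strings are carried as List Char (PySem convention); the result is wrapped by String.ofList.
-- One `inst` iteration of A's for-loop each; `stale` is the leftover value of Python's
-- `next` variable, which the trailing `if next == b` check reads when a block was skipped.
-- inst == "R": guard keeps source's bug `inst[-3:]` (inst is the 1-char loop variable "R")
def stepR (b cur : Int) (insts : List Char) (q : List (Int × List Char)) (v : Std.HashSet Int)
    (stale : Int) : List Char ⊕ (List (Int × List Char) × Std.HashSet Int) :=
  if insts = [] ∨ ¬ PySem.List.pyGet? insts (-1) = some 'L' ∨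
      (3 ≤ insts.length ∧ ¬ PySem.List.slice ['R'] (some (-3)) none = ['R', 'R', 'R']) then
    let nxt := pyR cur
    if v.contains nxt = true then Sum.inr (q, v)            -- continue: skips the next == b check
    else
      if nxt = b then Sum.inl (insts ++ ['R'])
      else Sum.inr (q ++ [(nxt, insts ++ ['R'])], v.insert nxt)
  else
    if stale = b then Sum.inl (insts ++ ['R']) else Sum.inr (q, v)

-- inst == "L" (then falls through to the "R" iteration)
def stepL (b cur : Int) (insts : List Char) (q : List (Int × List Char)) (v : Std.HashSet Int)
    (stale : Int) : List Char ⊕ (List (Int × List Char) × Std.HashSet Int) :=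
  if insts = [] ∨ ¬ PySem.List.pyGet? insts (-1) = some 'R' ∨
      (3 ≤ insts.length ∧ ¬ PySem.List.slice ['L'] (some (-3)) none = ['L', 'L', 'L']) then
    let nxt := pyL cur
    if v.contains nxt = true then stepR b cur insts q v nxt
    else
      if nxt = b then Sum.inl (insts ++ ['L'])
      else stepR b cur insts (q ++ [(nxt, insts ++ ['L'])]) (v.insert nxt) nxt
  else
    if stale = b then Sum.inl (insts ++ ['L']) else stepR b cur insts q v stale

-- inst == "S"
def stepS (b cur : Int) (insts : List Char) (q : List (Int × List Char)) (v : Std.HashSet Int) :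
    List Char ⊕ (List (Int × List Char) × Std.HashSet Int) :=
  let nxt := pyS cur
  if v.contains nxt = true then stepL b cur insts q v nxt
  else
    if nxt = b then Sum.inl (insts ++ ['S'])
    else stepL b cur insts (q ++ [(nxt, insts ++ ['S'])]) (v.insert nxt) nxt

-- inst == "D"
def stepD (b cur : Int) (insts : List Char) (q : List (Int × List Char)) (v : Std.HashSet Int) :
    List Char ⊕ (List (Int × List Char) × Std.HashSet Int) :=
  let nxt := pyD cur
  if v.contains nxt = true then stepS b cur insts q v
  else
    if nxt = b then Sum.inl (insts ++ ['D'])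
    else stepS b cur insts (q ++ [(nxt, insts ++ ['D'])]) (v.insert nxt)

-- the while loop; fuel 10001 bounds the ≤ 10000 possible pops (totality guard only)
def loopA (b : Int) : Nat → List (Int × List Char) → Std.HashSet Int → List Char
  | 0, _, _ => []
  | _ + 1, [], _ => []                               -- Python falls off the loop (returns None)
  | fuel + 1, (cur, insts) :: rest, v =>
    match stepD b cur insts rest v with
    | Sum.inl out => out
    | Sum.inr qv => loopA b fuel qv.1 qv.2

def bfs (a : Int) (b : Int) : String :=
  String.ofList (loopA b 10001 [(a, [])] ((∅ : Std.HashSet Int).insert a))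

-- ===== PORT B =====
-- one `for op, nxt in …` iteration of B's inner loop
def relaxB (cur : Int) (c : Char) (nxt : Int)
    (st : List Int × Std.HashSet Int × Std.HashMap Int (Char × Int)) :
    List Int × Std.HashSet Int × Std.HashMap Int (Char × Int) :=
  if st.2.1.contains nxt = true then st
  else (st.1 ++ [nxt], st.2.1.insert nxt, st.2.2.insert nxt (c, cur))

-- B's reconstruction loop (ops collected back-to-front); fuel is a totality guard
def rebuild : Nat → Std.HashMap Int (Char × Int) → Int → Int → List Char → List Char
  | 0, _, _, _, acc => acc
  | fuel + 1, p, a, cur, acc =>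
    if cur = a then acc
    else
    let e := p.getD cur ('?', 0)
    rebuild fuel p a e.2 (e.1 :: acc)

def loopB (a b : Int) : Nat → List Int → Std.HashSet Int → Std.HashMap Int (Char × Int) → List Char
  | 0, _, _, _ => []
  | _ + 1, [], _, _ => []        -- Python raises ValueError here; unreachable inside Pre_bfs
  | fuel + 1, cur :: rest, v, p =>
    if cur = b then rebuild 10001 p a b []
    else
      let st := relaxB cur 'R' (pyR cur) (relaxB cur 'L' (pyL cur)
                  (relaxB cur 'S' (pyS cur) (relaxB cur 'D' (pyD cur) (rest, v, p))))
      loopB a b fuel st.1 st.2.1 st.2.2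

def bfs_alt (a : Int) (b : Int) : String :=
  String.ofList (loopB a b 10001 [a] ((∅ : Std.HashSet Int).insert a) (∅ : Std.HashMap Int (Char × Int)))

-- ===== PRECONDITION & SPEC =====
-- Pre_ restricts to the problem's natural domain 0 ≤ a, b < 10000 with a ≠ b: outside it A
-- raises IndexError (a < -10000 or a ≥ 10000), returns None instead of a string (a = b, or b
-- never reached), or relies on Python's negative-index wraparound for -10000 ≤ a < 0.
def Pre_bfs (a : Int) (b : Int) : Prop :=
  0 ≤ a ∧ a < 10000 ∧ 0 ≤ b ∧ b < 10000 ∧ a ≠ b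
instance (a : Int) (b : Int) : Decidable (Pre_bfs a b) := by unfold Pre_bfs; infer_instance
def pvWitness_bfs : Int × Int := (1234, 3412)

def Spec_bfs (a : Int) (b : Int) (out : String) : Prop := out = bfs_alt a b
instance (a : Int) (b : Int) (out : String) : Decidable (Spec_bfs a b out) := by
  unfold Spec_bfs; infer_instance

-- ===== CLAIM (what is proved, stated in full; the proofs are below) =====
def Claim_equal_bfs : Prop := ∀ (a : Int) (b : Int), Dom_bfs a b → Pre_bfs a b → Spec_bfs a b (bfs a b)

-- ===== LEMMAS AND PROOFS =====

-- arithmetic facts about the four moves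
lemma pyD_range (n : Int) : 0 ≤ pyD n ∧ pyD n < 10000 := by
  unfold pyD
  rw [PySem.Int.mod_eq_emod_of_pos (by norm_num)]
  omega

lemma pyS_range (n : Int) : 0 ≤ pyS n ∧ pyS n < 10000 := by
  unfold pyS
  rw [PySem.Int.mod_eq_emod_of_pos (by norm_num)]
  omega

lemma pyL_range (n : Int) : 0 ≤ pyL n ∧ pyL n < 10000 := by
  unfold pyL
  rw [PySem.Int.mod_eq_emod_of_pos (by norm_num)]
  omega

lemma pyR_range (n : Int) (h1 : 0 ≤ n) (h2 : n < 10000) : 0 ≤ pyR n ∧ pyR n < 10000 := by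
  unfold pyR
  rw [PySem.Int.floordiv_eq_ediv_of_pos (by norm_num),
      PySem.Int.mod_eq_emod_of_pos (by norm_num)]
  omega

lemma pyLR (n : Int) (h1 : 0 ≤ n) (h2 : n < 10000) : pyL (pyR n) = n := by
  unfold pyL pyR
  rw [PySem.Int.floordiv_eq_ediv_of_pos (by norm_num),
      PySem.Int.mod_eq_emod_of_pos (by norm_num),
      PySem.Int.floordiv_eq_ediv_of_pos (by norm_num),
      PySem.Int.mod_eq_emod_of_pos (by norm_num)]
  have h3 : (n / 10 + n % 10 * 1000) / 1000 = n % 10 := by omega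
  rw [h3]
  omega

lemma pyRL (n : Int) (h1 : 0 ≤ n) (h2 : n < 10000) : pyR (pyL n) = n := by
  unfold pyL pyR
  rw [PySem.Int.mod_eq_emod_of_pos (by norm_num),
      PySem.Int.floordiv_eq_ediv_of_pos (by norm_num),
      PySem.Int.floordiv_eq_ediv_of_pos (by norm_num),
      PySem.Int.mod_eq_emod_of_pos (by norm_num)]
  have h3 : (10 * n + n / 1000) % 10000 = 10 * (n % 1000) + n / 1000 := by omega
  rw [h3]
  omega

def applyMove (c : Char) (n : Int) : Int :=
  if c = 'D' then pyD n else if c = 'S' then pyS n else if c = 'L' then pyL n else pyR n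

-- chain certificate: n is reached from a by the op list l recorded in the prev pointers,
-- every node on the chain being visited and in range
inductive Good (v : Std.HashSet Int) (p : Std.HashMap Int (Char × Int)) (a : Int) : Int → List Char → Prop
  | nil : Good v p a a []
  | cons {q m : Int} {c : Char} {l : List Char} :
      Good v p a q l → m ≠ a → v.contains m = true → 0 ≤ m → m < 10000 →
      p.getD m ('?', 0) = (c, q) → m = applyMove c q → Good v p a m (l ++ [c])

lemma Good_visited {v : Std.HashSet Int} {p a n l} (hg : Good v p a n l) (hva : v.contains a = true) :
    v.contains n = true := by
  cases hg with
  | nil => exact hva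
  | cons _ _ hv _ _ _ _ => exact hv

lemma Good_range {v : Std.HashSet Int} {p : Std.HashMap Int (Char × Int)} {a n : Int} {l}
    (hg : Good v p a n l) (ha1 : 0 ≤ a) (ha2 : a < 10000) : 0 ≤ n ∧ n < 10000 := by
  cases hg with
  | nil => exact ⟨ha1, ha2⟩
  | cons _ _ _ h1 h2 _ _ => exact ⟨h1, h2⟩

lemma updV_true {v : Std.HashSet Int} {x y : Int} (h : v.contains y = true) :
    (v.insert x).contains y = true := by
  rw [Std.HashSet.contains_insert, h, Bool.or_true]

lemma updV_false {v : Std.HashSet Int} {x y : Int} (h : v.contains y = false) (hne : y ≠ x) :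
    (v.insert x).contains y = false := by
  rw [Std.HashSet.contains_insert, h, Bool.or_false]
  exact beq_eq_false_iff_ne.mpr (Ne.symm hne)

lemma Good_mono {v : Std.HashSet Int} {p : Std.HashMap Int (Char × Int)} {a n : Int} {l}
    (hg : Good v p a n l) (x : Int) (hx : v.contains x = false) (e : Char × Int) :
    Good (v.insert x) (p.insert x e) a n l := by
  induction hg with
  | nil => exact Good.nil
  | cons hg' hne hv h1 h2 hp hmv ih =>
    rename_i q m c l'
    have hxm : m ≠ x := by intro h; rw [h, hx] at hv; cases hv
    refine Good.cons ih hne ?_ h1 h2 ?_ hmv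
    · exact updV_true hv
    · rw [Std.HashMap.getD_insert, if_neg (by simpa using Ne.symm hxm)]
      exact hp

lemma Good_snoc {v : Std.HashSet Int} {p : Std.HashMap Int (Char × Int)} {a cur nxt : Int} {l c}
    (hg : Good v p a cur l) (hva : v.contains a = true) (hfresh : v.contains nxt = false)
    (h1 : 0 ≤ nxt) (h2 : nxt < 10000) (hmv : nxt = applyMove c cur) :
    Good (v.insert nxt) (p.insert nxt (c, cur)) a nxt (l ++ [c]) := by
  refine Good.cons (Good_mono hg nxt hfresh _) ?_ ?_ h1 h2 ?_ hmv
  · intro h; rw [h, hva] at hfresh; cases hfresh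
  · exact Std.HashSet.contains_insert_self
  · simp [Std.HashMap.getD_insert]

lemma Good_inv {v : Std.HashSet Int} {p : Std.HashMap Int (Char × Int)} {a cur : Int} {L}
    (hg : Good v p a cur L) (hva : v.contains a = true) :
    (L = [] ∧ cur = a) ∨
      ∃ l c q0, L = l ++ [c] ∧ Good v p a q0 l ∧ cur = applyMove c q0 ∧ v.contains q0 = true := by
  cases hg with
  | nil => exact Or.inl ⟨rfl, rfl⟩
  | cons hg' hne hv h1 h2 hp hmv =>
    exact Or.inr ⟨_, _, _, rfl, hg', hmv, Good_visited hg' hva⟩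

-- after a move ending in 'R' the L-move undoes it (hence hits a visited state), and dually
lemma prune_L {v : Std.HashSet Int} {p : Std.HashMap Int (Char × Int)} {a cur : Int} {l}
    (hva : v.contains a = true) (ha1 : 0 ≤ a) (ha2 : a < 10000)
    (hcur : Good v p a cur l) (hlast : l.getLast? = some 'R') : v.contains (pyL cur) = true := by
  rcases Good_inv hcur hva with ⟨hl, _⟩ | ⟨l0, c, q0, hl, hg0, hmv, hv0⟩
  · rw [hl] at hlast; cases hlast
  · rw [hl] at hlast
    have hc : c = 'R' := by simpa using hlast
    obtain ⟨hq1, hq2⟩ := Good_range hg0 ha1 ha2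
    rw [hmv, hc]
    have : applyMove 'R' q0 = pyR q0 := by simp [applyMove]
    rw [this, pyLR q0 hq1 hq2]
    exact hv0

lemma prune_R {v : Std.HashSet Int} {p : Std.HashMap Int (Char × Int)} {a cur : Int} {l}
    (hva : v.contains a = true) (ha1 : 0 ≤ a) (ha2 : a < 10000)
    (hcur : Good v p a cur l) (hlast : l.getLast? = some 'L') : v.contains (pyR cur) = true := by
  rcases Good_inv hcur hva with ⟨hl, _⟩ | ⟨l0, c, q0, hl, hg0, hmv, hv0⟩
  · rw [hl] at hlast; cases hlast
  · rw [hl] at hlast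
    have hc : c = 'L' := by simpa using hlast
    obtain ⟨hq1, hq2⟩ := Good_range hg0 ha1 ha2
    rw [hmv, hc]
    have : applyMove 'L' q0 = pyL q0 := by simp [applyMove]
    rw [this, pyRL q0 hq1 hq2]
    exact hv0

-- number of visited states
def cnt (v : Std.HashSet Int) : Nat :=
  ((Finset.range 10000).filter (fun n : Nat => v.contains (n : Int) = true)).card

lemma cnt_le (v : Std.HashSet Int) : cnt v ≤ 10000 := by
  unfold cnt
  calc ((Finset.range 10000).filter _).card ≤ (Finset.range 10000).card :=
        Finset.card_filter_le _ _
    _ = 10000 := Finset.card_range _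

lemma cnt_lt (v : Std.HashSet Int) {n : Int} (h1 : 0 ≤ n) (h2 : n < 10000) (h3 : v.contains n = false) :
    cnt v < 10000 := by
  unfold cnt
  have hmem : n.toNat ∈ Finset.range 10000 := by simp; omega
  have hss : (Finset.range 10000).filter (fun m : Nat => v.contains (m : Int) = true) ⊂ Finset.range 10000 := by
    refine (Finset.ssubset_iff_of_subset (Finset.filter_subset _ _)).mpr ⟨n.toNat, hmem, ?_⟩
    simp only [Finset.mem_filter, Finset.mem_range, not_and]
    intro _
    rw [Int.toNat_of_nonneg h1, h3]
    simp
  have := Finset.card_lt_card hss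
  simpa using this

lemma cnt_upd (v : Std.HashSet Int) {n : Int} (h1 : 0 ≤ n) (h2 : n < 10000) (h3 : v.contains n = false) :
    cnt (v.insert n) = cnt v + 1 := by
  unfold cnt
  have hkey : (Finset.range 10000).filter (fun m : Nat => (v.insert n).contains (m : Int) = true)
      = insert n.toNat ((Finset.range 10000).filter (fun m : Nat => v.contains (m : Int) = true)) := by
    ext m
    simp only [Finset.mem_filter, Finset.mem_insert, Finset.mem_range,
      Std.HashSet.contains_insert, Bool.or_eq_true, beq_iff_eq]
    constructor
    · rintro ⟨hm, hv | hv⟩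
      · left; omega
      · right; exact ⟨hm, hv⟩
    · rintro (hm | ⟨hm, hv⟩)
      · subst hm
        exact ⟨by omega, Or.inl (by omega)⟩
      · exact ⟨hm, Or.inr hv⟩
  rw [hkey, Finset.card_insert_of_notMem]
  simp only [Finset.mem_filter, Finset.mem_range, not_and]
  intro _
  rw [Int.toNat_of_nonneg h1, h3]
  simp

lemma cnt_init {a : Int} (h1 : 0 ≤ a) (h2 : a < 10000) :
    cnt ((∅ : Std.HashSet Int).insert a) = 1 := by
  unfold cnt
  have hkey : (Finset.range 10000).filter
      (fun m : Nat => ((∅ : Std.HashSet Int).insert a).contains (m : Int) = true) = {a.toNat} := by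
    ext m
    simp only [Finset.mem_filter, Finset.mem_range, Finset.mem_singleton,
      Std.HashSet.contains_insert, Std.HashSet.contains_empty, Bool.or_false, beq_iff_eq]
    omega
  rw [hkey]
  rfl

-- rebuild follows a Good chain, producing exactly its op list
lemma rebuild_spec {v : Std.HashSet Int} {p : Std.HashMap Int (Char × Int)} {a n : Int} {l}
    (hg : Good v p a n l) : ∀ fuel acc, l.length < fuel → rebuild fuel p a n acc = l ++ acc := by
  induction hg with
  | nil =>
    intro fuel acc hf
    match fuel with
    | f + 1 => simp [rebuild]
  | cons hg' hne hv h1 h2 hp hmv ih =>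
    rename_i q m c l'
    intro fuel acc hf
    match fuel with
    | f + 1 =>
      have hlen : l'.length < f := by simpa using hf
      simp only [rebuild, if_neg hne, hp]
      rw [ih f (c :: acc) hlen]
      simp

-- invariant of B's outer loop while the found target b sits in the queue
def FInv (a b : Int) (lb : List Char)
    (st : List Int × Std.HashSet Int × Std.HashMap Int (Char × Int)) : Prop :=
  st.2.1.contains a = true ∧ b ∈ st.1 ∧ Good st.2.1 st.2.2 a b lb ∧
    (∀ n ∈ st.1, 0 ≤ n ∧ n < 10000) ∧ lb.length ≤ 10000

def mS (st : List Int × Std.HashSet Int × Std.HashMap Int (Char × Int)) : Nat :=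
  st.1.length + (10000 - cnt st.2.1)

lemma relax_pres {a b : Int} {lb : List Char} {cur : Int} {c : Char} {nxt : Int}
    (st : List Int × Std.HashSet Int × Std.HashMap Int (Char × Int))
    (h1 : 0 ≤ nxt) (h2 : nxt < 10000) (hF : FInv a b lb st) :
    FInv a b lb (relaxB cur c nxt st) ∧ mS (relaxB cur c nxt st) = mS st := by
  obtain ⟨q, v, p⟩ := st
  obtain ⟨hva, hb, hg, hr, hlen⟩ := hF
  by_cases hv : v.contains nxt = true
  · have : relaxB cur c nxt (q, v, p) = (q, v, p) := by
      unfold relaxB; rw [if_pos hv]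
    rw [this]
    exact ⟨⟨hva, hb, hg, hr, hlen⟩, rfl⟩
  · have hv' : v.contains nxt = false := by simpa using hv
    have hstep : relaxB cur c nxt (q, v, p)
        = (q ++ [nxt], v.insert nxt, p.insert nxt (c, cur)) := by
      unfold relaxB; rw [if_neg hv]
    rw [hstep]
    have hcnt := cnt_upd v h1 h2 hv'
    have hclt := cnt_lt v h1 h2 hv'
    refine ⟨⟨?_, ?_, ?_, ?_, hlen⟩, ?_⟩
    · exact updV_true hva
    · exact List.mem_append.mpr (Or.inl hb)
    · exact Good_mono hg nxt hv' (c, cur)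
    · intro n hn
      rcases List.mem_append.mp hn with h | h
      · exact hr n h
      · simp only [List.mem_singleton] at h; omega
    · show (q ++ [nxt]).length + (10000 - cnt (v.insert nxt)) = q.length + (10000 - cnt v)
      rw [List.length_append, hcnt]
      simp only [List.length_cons, List.length_nil]
      omega

set_option maxHeartbeats 1000000 in
lemma finds {a b : Int} {lb : List Char} :
    ∀ (fuel : Nat) (st : List Int × Std.HashSet Int × Std.HashMap Int (Char × Int)),
      FInv a b lb st → mS st ≤ fuel → loopB a b fuel st.1 st.2.1 st.2.2 = lb := by
  intro fuel
  induction fuel with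
  | zero =>
    intro st hF hm
    obtain ⟨q, v, p⟩ := st
    obtain ⟨_, hb, _, _, _⟩ := hF
    have hq : 1 ≤ q.length := by
      cases q with
      | nil => cases hb
      | cons _ _ => simp
    have hm' : q.length + (10000 - cnt v) ≤ 0 := hm
    omega
  | succ f ih =>
    intro st hF hm
    obtain ⟨q, v, p⟩ := st
    obtain ⟨hva, hb, hg, hr, hlen⟩ := hF
    cases q with
    | nil => cases hb
    | cons cur rest =>
      by_cases hcb : cur = b
      · simp only [loopB, if_pos hcb]
        subst hcb
        have := rebuild_spec hg 10001 [] (by omega)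
        simpa using this
      · have hbr : b ∈ rest := by
          rcases List.mem_cons.mp hb with h | h
          · exact absurd h.symm hcb
          · exact h
        have hcr : 0 ≤ cur ∧ cur < 10000 := hr cur (by simp)
        have hF0 : FInv a b lb (rest, v, p) :=
          ⟨hva, hbr, hg, fun n hn => hr n (List.mem_cons_of_mem _ hn), hlen⟩
        have p1 := relax_pres (cur := cur) (c := 'D') (rest, v, p)
          (pyD_range cur).1 (pyD_range cur).2 hF0
        have p2 := relax_pres (cur := cur) (c := 'S') _
          (pyS_range cur).1 (pyS_range cur).2 p1.1
        have p3 := relax_pres (cur := cur) (c := 'L') _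
          (pyL_range cur).1 (pyL_range cur).2 p2.1
        have p4 := relax_pres (cur := cur) (c := 'R') _
          (pyR_range cur hcr.1 hcr.2).1 (pyR_range cur hcr.1 hcr.2).2 p3.1
        simp only [loopB, if_neg hcb]
        refine ih _ p4.1 ?_
        rw [p4.2, p3.2, p2.2, p1.2]
        have hm' : (cur :: rest).length + (10000 - cnt v) ≤ f + 1 := hm
        have : mS (rest, v, p) = rest.length + (10000 - cnt v) := rfl
        rw [this]
        simp only [List.length_cons] at hm'
        omega

-- invariant tying A's queue to B's pointer state
def QInv (a : Int) (v : Std.HashSet Int) (p : Std.HashMap Int (Char × Int))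
    (qA : List (Int × List Char)) : Prop :=
  ∀ e ∈ qA, Good v p a e.1 e.2 ∧ e.2.length < cnt v

lemma QInv_step {a : Int} {v : Std.HashSet Int} {p : Std.HashMap Int (Char × Int)}
    {qA : List (Int × List Char)} {cur nxt : Int} {l : List Char} {c : Char}
    (hva : v.contains a = true) (hq : QInv a v p qA) (hcur : Good v p a cur l)
    (hlen : l.length < cnt v) (hfresh : v.contains nxt = false)
    (h1 : 0 ≤ nxt) (h2 : nxt < 10000) (hmv : nxt = applyMove c cur) :
    QInv a (v.insert nxt) (p.insert nxt (c, cur)) (qA ++ [(nxt, l ++ [c])]) := by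
  have hcnt := cnt_upd v h1 h2 hfresh
  intro e he
  rcases List.mem_append.mp he with h | h
  · obtain ⟨hg, hl⟩ := hq e h
    exact ⟨Good_mono hg nxt hfresh _, by omega⟩
  · simp only [List.mem_singleton] at h
    subst h
    refine ⟨Good_snoc hcur hva hfresh h1 h2 hmv, ?_⟩
    simp only [List.length_append, List.length_cons, List.length_nil]
    omega

lemma QInv_range {a : Int} {v : Std.HashSet Int} {p : Std.HashMap Int (Char × Int)}
    {qA : List (Int × List Char)} (ha1 : 0 ≤ a) (ha2 : a < 10000) (hq : QInv a v p qA) :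
    ∀ n ∈ qA.map Prod.fst, 0 ≤ n ∧ n < 10000 := by
  intro n hn
  rcases List.mem_map.mp hn with ⟨e, he, hne⟩
  rw [← hne]
  exact Good_range (hq e he).1 ha1 ha2

lemma relaxB_vis {cur : Int} {c : Char} {nxt : Int} {q : List Int} {v : Std.HashSet Int}
    {p : Std.HashMap Int (Char × Int)} (h : v.contains nxt = true) : relaxB cur c nxt (q, v, p) = (q, v, p) := by
  unfold relaxB; rw [if_pos h]

lemma relaxB_fresh {cur : Int} {c : Char} {nxt : Int} {q : List Int} {v : Std.HashSet Int}
    {p : Std.HashMap Int (Char × Int)} (h : v.contains nxt = false) :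
    relaxB cur c nxt (q, v, p) = (q ++ [nxt], v.insert nxt, p.insert nxt (c, cur)) := by
  have h' : (q, v, p).2.1.contains nxt = false := h
  unfold relaxB
  rw [if_neg (by rw [h']; exact Bool.false_ne_true)]

lemma FInv_found {a b cur nxt : Int} {c : Char} {l : List Char} {v : Std.HashSet Int}
    {p : Std.HashMap Int (Char × Int)} {qA : List (Int × List Char)}
    (ha1 : 0 ≤ a) (ha2 : a < 10000) (hva : v.contains a = true)
    (hq : QInv a v p qA) (hcur : Good v p a cur l) (hlen : l.length < cnt v)
    (hfresh : v.contains nxt = false) (h1 : 0 ≤ nxt) (h2 : nxt < 10000)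
    (hmv : nxt = applyMove c cur) (hbb : nxt = b) :
    FInv a b (l ++ [c]) (qA.map Prod.fst ++ [nxt], v.insert nxt, p.insert nxt (c, cur)) ∧
      mS (qA.map Prod.fst ++ [nxt], v.insert nxt, p.insert nxt (c, cur))
        = qA.length + (10000 - cnt v) := by
  have hcnt := cnt_upd v h1 h2 hfresh
  have hclt := cnt_lt v h1 h2 hfresh
  constructor
  · refine ⟨updV_true hva, ?_, ?_, ?_, ?_⟩
    · rw [← hbb]; exact List.mem_append.mpr (Or.inr (by simp))
    · rw [← hbb]; exact Good_snoc hcur hva hfresh h1 h2 hmv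
    · intro n hn
      rcases List.mem_append.mp hn with h | h
      · exact QInv_range ha1 ha2 hq n h
      · simp only [List.mem_singleton] at h; omega
    · have := cnt_le v
      simp only [List.length_append, List.length_cons, List.length_nil]
      omega
  · show (qA.map Prod.fst ++ [nxt]).length + (10000 - cnt (v.insert nxt)) = _
    rw [List.length_append, hcnt, List.length_map]
    simp only [List.length_cons, List.length_nil]
    omega

lemma stageR (a b cur : Int) (ha1 : 0 ≤ a) (ha2 : a < 10000) (fuel : Nat)
    (IH : ∀ (qA : List (Int × List Char)) (v : Std.HashSet Int) (p : Std.HashMap Int (Char × Int)),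
      v.contains a = true → v.contains b = false → QInv a v p qA →
      qA.length + (10000 - cnt v) ≤ fuel →
      loopA b fuel qA v = loopB a b fuel (qA.map Prod.fst) v p)
    (l : List Char) (qA : List (Int × List Char)) (v : Std.HashSet Int) (p : Std.HashMap Int (Char × Int))
    (stale : Int)
    (hva : v.contains a = true) (hvb : v.contains b = false)
    (hcur : Good v p a cur l) (hlen : l.length < cnt v)
    (hq : QInv a v p qA) (hstale : stale ≠ b)
    (hm : qA.length + (10000 - cnt v) ≤ fuel) :
    (match stepR b cur l qA v stale with
     | Sum.inl out => out
     | Sum.inr qv => loopA b fuel qv.1 qv.2)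
    = loopB a b fuel (relaxB cur 'R' (pyR cur) (qA.map Prod.fst, v, p)).1
        (relaxB cur 'R' (pyR cur) (qA.map Prod.fst, v, p)).2.1
        (relaxB cur 'R' (pyR cur) (qA.map Prod.fst, v, p)).2.2 := by
  have hcr := Good_range hcur ha1 ha2
  have hnr := pyR_range cur hcr.1 hcr.2
  by_cases hc : l = [] ∨ ¬ PySem.List.pyGet? l (-1) = some 'L' ∨
      (3 ≤ l.length ∧ ¬ PySem.List.slice ['R'] (some (-3)) none = ['R', 'R', 'R'])
  · -- the L-guard lets the R block run
    by_cases hv : v.contains (pyR cur) = true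
    · have hA : stepR b cur l qA v stale = Sum.inr (qA, v) := by
        unfold stepR; rw [if_pos hc, if_pos hv]
      rw [hA, relaxB_vis hv]
      exact IH qA v p hva hvb hq hm
    · have hv' : v.contains (pyR cur) = false := by simpa using hv
      rw [relaxB_fresh hv']
      by_cases hbb : pyR cur = b
      · have hA : stepR b cur l qA v stale = Sum.inl (l ++ ['R']) := by
          unfold stepR; rw [if_pos hc, if_neg hv, if_pos hbb]
        rw [hA]
        have hmv : pyR cur = applyMove 'R' cur := by simp [applyMove]
        obtain ⟨hF, hms⟩ := FInv_found ha1 ha2 hva hq hcur hlen hv' hnr.1 hnr.2 hmv hbb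
        exact (finds fuel _ hF (by omega)).symm
      · have hA : stepR b cur l qA v stale
            = Sum.inr (qA ++ [(pyR cur, l ++ ['R'])], v.insert (pyR cur)) := by
          unfold stepR; rw [if_pos hc, if_neg hv, if_neg hbb]
        rw [hA]
        have hmv : pyR cur = applyMove 'R' cur := by simp [applyMove]
        have hq' := QInv_step hva hq hcur hlen hv' hnr.1 hnr.2 hmv
        have hmap : (qA ++ [(pyR cur, l ++ ['R'])]).map Prod.fst
            = qA.map Prod.fst ++ [pyR cur] := by simp
        have hcnt := cnt_upd v hnr.1 hnr.2 hv'
        have hclt := cnt_lt v hnr.1 hnr.2 hv'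
        have := IH (qA ++ [(pyR cur, l ++ ['R'])]) (v.insert (pyR cur)) (p.insert (pyR cur) ('R', cur))
          (updV_true hva) (updV_false hvb (Ne.symm hbb)) hq'
          (by rw [List.length_append, hcnt]; simp only [List.length_cons, List.length_nil]; omega)
        rw [hmap] at this
        exact this
  · -- pruned: Python reads the stale `next`; B's L-undo state is already visited
    push_neg at hc
    have hlast : l.getLast? = some 'L' := by
      rw [← PySem.List.pyGet?_neg_one]
      exact hc.2.1
    have hv : v.contains (pyR cur) = true := prune_R hva ha1 ha2 hcur hlast
    have hA : stepR b cur l qA v stale = Sum.inr (qA, v) := by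
      unfold stepR
      rw [if_neg ?hg, if_neg hstale]
      case hg =>
        push_neg
        exact hc
    rw [hA, relaxB_vis hv]
    exact IH qA v p hva hvb hq hm

lemma stageL (a b cur : Int) (ha1 : 0 ≤ a) (ha2 : a < 10000) (fuel : Nat)
    (IH : ∀ (qA : List (Int × List Char)) (v : Std.HashSet Int) (p : Std.HashMap Int (Char × Int)),
      v.contains a = true → v.contains b = false → QInv a v p qA →
      qA.length + (10000 - cnt v) ≤ fuel →
      loopA b fuel qA v = loopB a b fuel (qA.map Prod.fst) v p)
    (l : List Char) (qA : List (Int × List Char)) (v : Std.HashSet Int) (p : Std.HashMap Int (Char × Int))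
    (stale : Int)
    (hva : v.contains a = true) (hvb : v.contains b = false)
    (hcur : Good v p a cur l) (hlen : l.length < cnt v)
    (hq : QInv a v p qA) (hstale : stale ≠ b)
    (hm : qA.length + (10000 - cnt v) ≤ fuel) :
    (match stepL b cur l qA v stale with
     | Sum.inl out => out
     | Sum.inr qv => loopA b fuel qv.1 qv.2)
    = (let st := relaxB cur 'R' (pyR cur) (relaxB cur 'L' (pyL cur) (qA.map Prod.fst, v, p));
       loopB a b fuel st.1 st.2.1 st.2.2) := by
  have hcr := Good_range hcur ha1 ha2
  have hnr := pyL_range cur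
  by_cases hc : l = [] ∨ ¬ PySem.List.pyGet? l (-1) = some 'R' ∨
      (3 ≤ l.length ∧ ¬ PySem.List.slice ['L'] (some (-3)) none = ['L', 'L', 'L'])
  · by_cases hv : v.contains (pyL cur) = true
    · have hA : stepL b cur l qA v stale = stepR b cur l qA v (pyL cur) := by
        unfold stepL; rw [if_pos hc, if_pos hv]
      have hstale' : pyL cur ≠ b := by
        intro h; rw [h, hvb] at hv; cases hv
      rw [hA, relaxB_vis hv]
      exact stageR a b cur ha1 ha2 fuel IH l qA v p (pyL cur) hva hvb hcur hlen hq hstale' hm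
    · have hv' : v.contains (pyL cur) = false := by simpa using hv
      rw [relaxB_fresh hv']
      by_cases hbb : pyL cur = b
      · have hA : stepL b cur l qA v stale = Sum.inl (l ++ ['L']) := by
          unfold stepL; rw [if_pos hc, if_neg hv, if_pos hbb]
        rw [hA]
        have hmv : pyL cur = applyMove 'L' cur := by simp [applyMove]
        obtain ⟨hF, hms⟩ := FInv_found ha1 ha2 hva hq hcur hlen hv' hnr.1 hnr.2 hmv hbb
        have hRr := pyR_range cur hcr.1 hcr.2
        have p4 := relax_pres (cur := cur) (c := 'R') _ hRr.1 hRr.2 hF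
        exact (finds fuel _ p4.1 (by rw [p4.2, hms]; omega)).symm
      · have hA : stepL b cur l qA v stale
            = stepR b cur l (qA ++ [(pyL cur, l ++ ['L'])]) (v.insert (pyL cur)) (pyL cur) := by
          unfold stepL; rw [if_pos hc, if_neg hv, if_neg hbb]
        rw [hA]
        have hmv : pyL cur = applyMove 'L' cur := by simp [applyMove]
        have hq' := QInv_step hva hq hcur hlen hv' hnr.1 hnr.2 hmv
        have hcnt := cnt_upd v hnr.1 hnr.2 hv'
        have hclt := cnt_lt v hnr.1 hnr.2 hv'
        have hrec := stageR a b cur ha1 ha2 fuel IH l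
          (qA ++ [(pyL cur, l ++ ['L'])]) (v.insert (pyL cur)) (p.insert (pyL cur) ('L', cur))
          (pyL cur)
          (updV_true hva) (updV_false hvb (Ne.symm hbb))
          (Good_mono hcur (pyL cur) hv' _) (by omega) hq' hbb
          (by rw [List.length_append, hcnt]; simp only [List.length_cons, List.length_nil]; omega)
        rw [hrec]
        have hmap : (qA ++ [(pyL cur, l ++ ['L'])]).map Prod.fst
            = qA.map Prod.fst ++ [pyL cur] := by simp
        rw [hmap]
  · push_neg at hc
    have hlast : l.getLast? = some 'R' := by
      rw [← PySem.List.pyGet?_neg_one]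
      exact hc.2.1
    have hv : v.contains (pyL cur) = true := prune_L hva ha1 ha2 hcur hlast
    have hA : stepL b cur l qA v stale = stepR b cur l qA v stale := by
      unfold stepL
      rw [if_neg ?hg, if_neg hstale]
      case hg => push_neg; exact hc
    rw [hA, relaxB_vis hv]
    exact stageR a b cur ha1 ha2 fuel IH l qA v p stale hva hvb hcur hlen hq hstale hm

lemma stageS (a b cur : Int) (ha1 : 0 ≤ a) (ha2 : a < 10000) (fuel : Nat)
    (IH : ∀ (qA : List (Int × List Char)) (v : Std.HashSet Int) (p : Std.HashMap Int (Char × Int)),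
      v.contains a = true → v.contains b = false → QInv a v p qA →
      qA.length + (10000 - cnt v) ≤ fuel →
      loopA b fuel qA v = loopB a b fuel (qA.map Prod.fst) v p)
    (l : List Char) (qA : List (Int × List Char)) (v : Std.HashSet Int) (p : Std.HashMap Int (Char × Int))
    (hva : v.contains a = true) (hvb : v.contains b = false)
    (hcur : Good v p a cur l) (hlen : l.length < cnt v)
    (hq : QInv a v p qA)
    (hm : qA.length + (10000 - cnt v) ≤ fuel) :
    (match stepS b cur l qA v with
     | Sum.inl out => out
     | Sum.inr qv => loopA b fuel qv.1 qv.2)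
    = (let st := relaxB cur 'R' (pyR cur) (relaxB cur 'L' (pyL cur)
          (relaxB cur 'S' (pyS cur) (qA.map Prod.fst, v, p)));
       loopB a b fuel st.1 st.2.1 st.2.2) := by
  have hcr := Good_range hcur ha1 ha2
  have hnr := pyS_range cur
  by_cases hv : v.contains (pyS cur) = true
  · have hA : stepS b cur l qA v = stepL b cur l qA v (pyS cur) := by
      unfold stepS; rw [if_pos hv]
    have hstale' : pyS cur ≠ b := by
      intro h; rw [h, hvb] at hv; cases hv
    rw [hA, relaxB_vis hv]
    exact stageL a b cur ha1 ha2 fuel IH l qA v p (pyS cur) hva hvb hcur hlen hq hstale' hm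
  · have hv' : v.contains (pyS cur) = false := by simpa using hv
    rw [relaxB_fresh hv']
    by_cases hbb : pyS cur = b
    · have hA : stepS b cur l qA v = Sum.inl (l ++ ['S']) := by
        unfold stepS; rw [if_neg hv, if_pos hbb]
      rw [hA]
      have hmv : pyS cur = applyMove 'S' cur := by simp [applyMove]
      obtain ⟨hF, hms⟩ := FInv_found ha1 ha2 hva hq hcur hlen hv' hnr.1 hnr.2 hmv hbb
      have hLr := pyL_range cur
      have hRr := pyR_range cur hcr.1 hcr.2
      have p3 := relax_pres (cur := cur) (c := 'L') _ hLr.1 hLr.2 hF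
      have p4 := relax_pres (cur := cur) (c := 'R') _ hRr.1 hRr.2 p3.1
      exact (finds fuel _ p4.1 (by rw [p4.2, p3.2, hms]; omega)).symm
    · have hA : stepS b cur l qA v
          = stepL b cur l (qA ++ [(pyS cur, l ++ ['S'])]) (v.insert (pyS cur)) (pyS cur) := by
        unfold stepS; rw [if_neg hv, if_neg hbb]
      rw [hA]
      have hmv : pyS cur = applyMove 'S' cur := by simp [applyMove]
      have hq' := QInv_step hva hq hcur hlen hv' hnr.1 hnr.2 hmv
      have hcnt := cnt_upd v hnr.1 hnr.2 hv'
      have hclt := cnt_lt v hnr.1 hnr.2 hv'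
      have hrec := stageL a b cur ha1 ha2 fuel IH l
        (qA ++ [(pyS cur, l ++ ['S'])]) (v.insert (pyS cur)) (p.insert (pyS cur) ('S', cur))
        (pyS cur)
        (updV_true hva) (updV_false hvb (Ne.symm hbb))
        (Good_mono hcur (pyS cur) hv' _) (by omega) hq' hbb
        (by rw [List.length_append, hcnt]; simp only [List.length_cons, List.length_nil]; omega)
      rw [hrec]
      have hmap : (qA ++ [(pyS cur, l ++ ['S'])]).map Prod.fst
          = qA.map Prod.fst ++ [pyS cur] := by simp
      rw [hmap]

lemma stageD (a b cur : Int) (ha1 : 0 ≤ a) (ha2 : a < 10000) (fuel : Nat)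
    (IH : ∀ (qA : List (Int × List Char)) (v : Std.HashSet Int) (p : Std.HashMap Int (Char × Int)),
      v.contains a = true → v.contains b = false → QInv a v p qA →
      qA.length + (10000 - cnt v) ≤ fuel →
      loopA b fuel qA v = loopB a b fuel (qA.map Prod.fst) v p)
    (l : List Char) (qA : List (Int × List Char)) (v : Std.HashSet Int) (p : Std.HashMap Int (Char × Int))
    (hva : v.contains a = true) (hvb : v.contains b = false)
    (hcur : Good v p a cur l) (hlen : l.length < cnt v)
    (hq : QInv a v p qA)
    (hm : qA.length + (10000 - cnt v) ≤ fuel) :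
    (match stepD b cur l qA v with
     | Sum.inl out => out
     | Sum.inr qv => loopA b fuel qv.1 qv.2)
    = (let st := relaxB cur 'R' (pyR cur) (relaxB cur 'L' (pyL cur)
          (relaxB cur 'S' (pyS cur) (relaxB cur 'D' (pyD cur) (qA.map Prod.fst, v, p))));
       loopB a b fuel st.1 st.2.1 st.2.2) := by
  have hcr := Good_range hcur ha1 ha2
  have hnr := pyD_range cur
  by_cases hv : v.contains (pyD cur) = true
  · have hA : stepD b cur l qA v = stepS b cur l qA v := by
      unfold stepD; rw [if_pos hv]
    rw [hA, relaxB_vis hv]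
    exact stageS a b cur ha1 ha2 fuel IH l qA v p hva hvb hcur hlen hq hm
  · have hv' : v.contains (pyD cur) = false := by simpa using hv
    rw [relaxB_fresh hv']
    by_cases hbb : pyD cur = b
    · have hA : stepD b cur l qA v = Sum.inl (l ++ ['D']) := by
        unfold stepD; rw [if_neg hv, if_pos hbb]
      rw [hA]
      have hmv : pyD cur = applyMove 'D' cur := by simp [applyMove]
      obtain ⟨hF, hms⟩ := FInv_found ha1 ha2 hva hq hcur hlen hv' hnr.1 hnr.2 hmv hbb
      have hSr := pyS_range cur
      have hLr := pyL_range cur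
      have hRr := pyR_range cur hcr.1 hcr.2
      have p2 := relax_pres (cur := cur) (c := 'S') _ hSr.1 hSr.2 hF
      have p3 := relax_pres (cur := cur) (c := 'L') _ hLr.1 hLr.2 p2.1
      have p4 := relax_pres (cur := cur) (c := 'R') _ hRr.1 hRr.2 p3.1
      exact (finds fuel _ p4.1 (by rw [p4.2, p3.2, p2.2, hms]; omega)).symm
    · have hA : stepD b cur l qA v
          = stepS b cur l (qA ++ [(pyD cur, l ++ ['D'])]) (v.insert (pyD cur)) := by
        unfold stepD; rw [if_neg hv, if_neg hbb]
      rw [hA]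
      have hmv : pyD cur = applyMove 'D' cur := by simp [applyMove]
      have hq' := QInv_step hva hq hcur hlen hv' hnr.1 hnr.2 hmv
      have hcnt := cnt_upd v hnr.1 hnr.2 hv'
      have hclt := cnt_lt v hnr.1 hnr.2 hv'
      have hrec := stageS a b cur ha1 ha2 fuel IH l
        (qA ++ [(pyD cur, l ++ ['D'])]) (v.insert (pyD cur)) (p.insert (pyD cur) ('D', cur))
        (updV_true hva) (updV_false hvb (Ne.symm hbb))
        (Good_mono hcur (pyD cur) hv' _) (by omega) hq'
        (by rw [List.length_append, hcnt]; simp only [List.length_cons, List.length_nil]; omega)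
      rw [hrec]
      have hmap : (qA ++ [(pyD cur, l ++ ['D'])]).map Prod.fst
          = qA.map Prod.fst ++ [pyD cur] := by simp
      rw [hmap]

lemma mainLoop (a b : Int) (ha1 : 0 ≤ a) (ha2 : a < 10000) :
    ∀ (fuel : Nat) (qA : List (Int × List Char)) (v : Std.HashSet Int) (p : Std.HashMap Int (Char × Int)),
      v.contains a = true → v.contains b = false → QInv a v p qA →
      qA.length + (10000 - cnt v) ≤ fuel →
      loopA b fuel qA v = loopB a b fuel (qA.map Prod.fst) v p := by
  intro fuel
  induction fuel with
  | zero => intro qA v p _ _ _ _; rfl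
  | succ f ih =>
    intro qA v p hva hvb hq hm
    cases qA with
    | nil => rfl
    | cons e rest =>
      obtain ⟨cur, l⟩ := e
      obtain ⟨hcur, hlen⟩ := hq (cur, l) (by simp)
      have hrest : QInv a v p rest := fun e he => hq e (List.mem_cons_of_mem _ he)
      have hcb : cur ≠ b := by
        intro h
        have := Good_visited hcur hva
        rw [h, hvb] at this
        cases this
      have hm' : rest.length + (10000 - cnt v) ≤ f := by
        simp only [List.length_cons] at hm
        omega
      have hgoal := stageD a b cur ha1 ha2 f ih l rest v p hva hvb hcur hlen hrest hm'
      calc loopA b (f + 1) ((cur, l) :: rest) v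
          = (match stepD b cur l rest v with
             | Sum.inl out => out
             | Sum.inr qv => loopA b f qv.1 qv.2) := rfl
        _ = _ := by
            rw [hgoal]
            show _ = loopB a b (f + 1) (cur :: rest.map Prod.fst) v p
            rw [loopB]
            rw [if_neg hcb]

-- ===== VERDICT (by name: the statement is the Claim_ definition above) =====
theorem bfs_spec : Claim_equal_bfs := by
  intro a b _ hpre
  obtain ⟨ha1, ha2, hb1, hb2, hab⟩ := hpre
  unfold Spec_bfs bfs bfs_alt
  have hva : ((∅ : Std.HashSet Int).insert a).contains a = true := by
    rw [Std.HashSet.contains_insert]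
    simp
  have hvb : ((∅ : Std.HashSet Int).insert a).contains b = false := by
    rw [Std.HashSet.contains_insert, Std.HashSet.contains_empty, Bool.or_false]
    exact beq_eq_false_iff_ne.mpr hab
  have hq : QInv a ((∅ : Std.HashSet Int).insert a) (∅ : Std.HashMap Int (Char × Int)) [(a, [])] := by
    intro e he
    simp only [List.mem_singleton] at he
    rw [he]
    exact ⟨Good.nil, by rw [cnt_init ha1 ha2]; simp⟩
  have hmain := mainLoop a b ha1 ha2 10001 [(a, [])] ((∅ : Std.HashSet Int).insert a)
    (∅ : Std.HashMap Int (Char × Int)) hva hvb hq (by rw [cnt_init ha1 ha2]; simp)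
  rw [hmain]
  rfl
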